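-- pv_equiv track=rewrite | github.com/fermulerpy/fermulerpy | src/fermulerpy/constants/useful_series.py | newman_conway_series
-- ===== SOURCE A (Python) =====
-- def newman_conway(n):
--     """
--     Returns the n'th newman_conway number
--
--     Parameters
--     ----------
--     n : int
--         denotes the number for which newman_conway number needs to be calculated
--     return : int
--         return an integer
--     """
--     f = [0, 1, 1]
--     for i in range(3, n + 1):
--         r = f[f[i-1]]+f[i-f[i-1]]
--         f.append(r);
--     return f[n]
--
-- def newman_conway_series(n):
--     """
--     Returns first n newman_conway numbers
--
--     Parameters
--     ----------
--     n : int
--         denotes the count of newman_conway numbers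
--     return : array
--         return an array of integers
--     """
--     if(n<1):
--         raise ValueError(
--             "Invalid Input"
--         )
--     arr = []
--     for i in range(1,n+1):
--         arr.append(newman_conway(i))
--     return arr
-- ===== SOURCE B (Python) =====
-- def newman_conway_series(n):
--     if n < 1:
--         raise ValueError(
--             "Invalid Input"
--         )
--     s = [1, 1]
--     for i in range(3, n + 1):
--         p = s[i - 2]
--         s.append(s[p - 1] + s[i - p - 1])
--     return s[:n]
-- ===== Notes on version B (the rewrite author's own statement) =====
-- stated objective: faster
-- what changed: B replaces A's per-element rebuild (calling newman_conway(i) for every i, each rebuilding the DP table) with a single 1-based DP pass over a table holding P(1..n) directly (no dummy 0th entry) whose prefix s[:n] is the answer.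
import Mathlib
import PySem

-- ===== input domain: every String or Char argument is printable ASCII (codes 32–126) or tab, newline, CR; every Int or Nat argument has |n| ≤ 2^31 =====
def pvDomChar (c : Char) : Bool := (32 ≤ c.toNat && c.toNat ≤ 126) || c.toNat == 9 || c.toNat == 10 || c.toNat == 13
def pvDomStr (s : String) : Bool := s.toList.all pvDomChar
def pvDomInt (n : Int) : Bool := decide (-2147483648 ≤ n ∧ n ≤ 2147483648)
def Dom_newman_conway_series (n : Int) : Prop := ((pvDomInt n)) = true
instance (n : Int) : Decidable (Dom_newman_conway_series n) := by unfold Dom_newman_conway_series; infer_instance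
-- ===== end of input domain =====

-- B runs ONE 1-based DP pass (list s with s[k] = P(k+1), no dummy 0 entry) and returns
-- s[:n], instead of A's rebuilding the whole 0-based table from scratch for every index.

-- ===== PORT A =====
-- newman_conway(n): f = [0,1,1]; for i in range(3, n+1): f.append(f[f[i-1]] + f[i-f[i-1]]); return f[n]
-- (indices are always in range on the admitted inputs, so pyGetD with default 0 is exact there)
def ncTab (n : Int) : List Int :=
  (PySem.List.pyRange 3 (n + 1) 1).foldl
    (fun f i =>
      f ++ [PySem.List.pyGetD f (PySem.List.pyGetD f (i - 1) 0) 0 +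
            PySem.List.pyGetD f (i - PySem.List.pyGetD f (i - 1) 0) 0])
    [0, 1, 1]

def newman_conway (n : Int) : Int :=
  PySem.List.pyGetD (ncTab n) n 0

-- arr = []; for i in range(1, n+1): arr.append(newman_conway(i))
def newman_conway_series (n : Int) : List Int :=
  (PySem.List.pyRange 1 (n + 1) 1).foldl (fun arr i => arr ++ [newman_conway i]) []

-- ===== PORT B =====
-- s = [1,1]; for i in range(3, n+1): p = s[i-2]; s.append(s[p-1] + s[i-p-1]); return s[:n]
def sTab (n : Int) : List Int :=
  (PySem.List.pyRange 3 (n + 1) 1).foldl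
    (fun s i =>
      let p := PySem.List.pyGetD s (i - 2) 0
      s ++ [PySem.List.pyGetD s (p - 1) 0 + PySem.List.pyGetD s (i - p - 1) 0])
    [1, 1]

def newman_conway_series_alt (n : Int) : List Int :=
  PySem.List.slice (sTab n) none (some n)

-- ===== PRECONDITION & SPEC =====
-- Python A raises ValueError for n < 1; excluded.
def Pre_newman_conway_series (n : Int) : Prop := 1 ≤ n
instance (n : Int) : Decidable (Pre_newman_conway_series n) := by
  unfold Pre_newman_conway_series; infer_instance

def pvWitness_newman_conway_series : Int := 5

def Spec_newman_conway_series (n : Int) (out : List Int) : Prop := out = newman_conway_series_alt n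
instance (n : Int) (out : List Int) : Decidable (Spec_newman_conway_series n out) := by
  unfold Spec_newman_conway_series; infer_instance

-- ===== CLAIM (what is proved, stated in full; the proofs are below) =====
def Claim_equal_newman_conway_series : Prop :=
  ∀ (n : Int), Dom_newman_conway_series n → Pre_newman_conway_series n →
    Spec_newman_conway_series n (newman_conway_series n)

-- ===== LEMMAS AND PROOFS =====

theorem ncTab_succ (n : Int) (h : 2 ≤ n) :
    ncTab (n + 1) = (ncTab n) ++
      [PySem.List.pyGetD (ncTab n) (PySem.List.pyGetD (ncTab n) ((n + 1) - 1) 0) 0 +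
       PySem.List.pyGetD (ncTab n) ((n + 1) - PySem.List.pyGetD (ncTab n) ((n + 1) - 1) 0) 0] := by
  unfold ncTab
  rw [PySem.List.pyRange_one_succ_right (by omega : (3:Int) ≤ n + 1)]
  rw [List.foldl_append]
  rfl

theorem sTab_succ (n : Int) (h : 2 ≤ n) :
    sTab (n + 1) = (sTab n) ++
      [PySem.List.pyGetD (sTab n) (PySem.List.pyGetD (sTab n) ((n + 1) - 2) 0 - 1) 0 +
       PySem.List.pyGetD (sTab n)
         ((n + 1) - PySem.List.pyGetD (sTab n) ((n + 1) - 2) 0 - 1) 0] := by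
  unfold sTab
  rw [PySem.List.pyRange_one_succ_right (by omega : (3:Int) ≤ n + 1)]
  rw [List.foldl_append]
  rfl

-- invariant on A's table: length, and every P(k) lies in [1, k]
def GoodTab (f : List Int) (n : Nat) : Prop :=
  f.length = n + 1 ∧ ∀ k : Nat, 1 ≤ k → k ≤ n → 1 ≤ f.getD k 0 ∧ f.getD k 0 ≤ (k : Int)

theorem getD_append_lt (xs ys : List Int) (k : Nat) (h : k < xs.length) :
    (xs ++ ys).getD k 0 = xs.getD k 0 := by
  simp [List.getD, List.getElem?_append_left h]

theorem getD_append_len (xs : List Int) (x : Int) :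
    (xs ++ [x]).getD xs.length 0 = x := by
  simp [List.getD]

theorem ncTab_good (m : Nat) : GoodTab (ncTab ((m : Int) + 2)) (m + 2) := by
  induction m with
  | zero =>
      refine ⟨rfl, ?_⟩
      intro k h1 h2
      interval_cases k <;> simp [ncTab, PySem.List.pyRange] <;> decide
  | succ j ih =>
      obtain ⟨hlen, hbd⟩ := ih
      have hc : (((j + 1 : Nat) : Int) + 2) = ((j : Int) + 2) + 1 := by push_cast; ring
      rw [hc, ncTab_succ _ (by omega)]
      set f := ncTab ((j : Int) + 2) with hf
      have hp1 : ((j : Int) + 2) + 1 - 1 = ((j + 2 : Nat) : Int) := by push_cast; ring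
      rw [hp1, PySem.List.pyGetD_natCast]
      set p := f.getD (j + 2) 0 with hp
      obtain ⟨hp_lo, hp_hi⟩ := hbd (j + 2) (by omega) (by omega)
      have hpt : p = ((p.toNat : Nat) : Int) := by omega
      have hq1 : PySem.List.pyGetD f p 0 = f.getD p.toNat 0 :=
        PySem.List.pyGetD_of_nonneg f 0 (by omega)
      have hi2 : ((j : Int) + 2) + 1 - p = (((j + 3 - p.toNat : Nat) : Nat) : Int) := by
        push_cast; omega
      have hq2 : PySem.List.pyGetD f (((j : Int) + 2) + 1 - p) 0 = f.getD (j + 3 - p.toNat) 0 := by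
        rw [hi2, PySem.List.pyGetD_natCast]
      rw [hq1, hq2]
      obtain ⟨hv1_lo, hv1_hi⟩ := hbd p.toNat (by omega) (by omega)
      obtain ⟨hv2_lo, hv2_hi⟩ := hbd (j + 3 - p.toNat) (by omega) (by omega)
      constructor
      · simp [hlen]
      · intro k h1 h2
        by_cases hk : k < f.length
        · rw [getD_append_lt _ _ _ hk]
          exact hbd k h1 (by omega)
        · have hkk : k = f.length := by omega
          rw [hkk, getD_append_len]
          have : (f.length : Int) = (j : Int) + 3 := by rw [hlen]; push_cast; ring
          constructor
          · omega
          · rw [this]; omega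

theorem getD_drop_one (f : List Int) (j : Nat) :
    (f.drop 1).getD j 0 = f.getD (j + 1) 0 := by
  simp [List.getD, List.getElem?_drop]

-- B's table is exactly A's table without the leading dummy 0
theorem sTab_eq_drop (m : Nat) :
    sTab ((m : Int) + 2) = (ncTab ((m : Int) + 2)).drop 1 := by
  induction m with
  | zero => rfl
  | succ j ih =>
      obtain ⟨hlen, hbd⟩ := ncTab_good j
      have hc : (((j + 1 : Nat) : Int) + 2) = ((j : Int) + 2) + 1 := by push_cast; ring
      rw [hc, sTab_succ _ (by omega), ncTab_succ _ (by omega), ih]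
      set f := ncTab ((j : Int) + 2) with hf
      congr 1
      have hp1 : ((j : Int) + 2) + 1 - 1 = ((j + 2 : Nat) : Int) := by push_cast; ring
      have hp2 : ((j : Int) + 2) + 1 - 2 = ((j + 1 : Nat) : Int) := by push_cast; ring
      rw [hp1, hp2, PySem.List.pyGetD_natCast, PySem.List.pyGetD_natCast, getD_drop_one]
      set p := f.getD (j + 2) 0 with hp
      obtain ⟨hp_lo, hp_hi⟩ := hbd (j + 2) (by omega) (by omega)
      have h1 : PySem.List.pyGetD (f.drop 1) (p - 1) 0 = PySem.List.pyGetD f p 0 := by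
        rw [PySem.List.pyGetD_of_nonneg _ 0 (by omega : (0:Int) ≤ p - 1),
            PySem.List.pyGetD_of_nonneg _ 0 (by omega : (0:Int) ≤ p),
            getD_drop_one]
        congr 1
        omega
      have h2 : PySem.List.pyGetD (f.drop 1) (((j : Int) + 2) + 1 - p - 1) 0 =
                PySem.List.pyGetD f (((j : Int) + 2) + 1 - p) 0 := by
        rw [PySem.List.pyGetD_of_nonneg _ 0 (by omega : (0:Int) ≤ ((j : Int) + 2) + 1 - p - 1),
            PySem.List.pyGetD_of_nonneg _ 0 (by omega : (0:Int) ≤ ((j : Int) + 2) + 1 - p),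
            getD_drop_one]
        congr 1
        omega
      rw [h1, h2]
      rw [List.drop_append_of_le_length (by simp [hlen])]

theorem pyGetD_append_len (xs : List Int) (x d : Int) :
    PySem.List.pyGetD (xs ++ [x]) ((xs.length : Int)) d = x := by
  rw [PySem.List.pyGetD_natCast]
  simp [List.getD]

theorem ncTab_length (m : Nat) : (ncTab ((m : Int) + 2)).length = m + 3 :=
  (ncTab_good m).1

-- A's series equals the tail of A's full table (at the inductive offsets used below)
theorem series_eq_drop (m : Nat) :
    newman_conway_series ((m : Int) + 2) = (ncTab ((m : Int) + 2)).drop 1 := by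
  induction m with
  | zero => rfl
  | succ k ih =>
      have hcast : (((k + 1 : Nat) : Int) + 2) = ((k : Int) + 2) + 1 := by push_cast; ring
      rw [hcast]
      have hA : newman_conway_series (((k : Int) + 2) + 1)
          = newman_conway_series ((k : Int) + 2) ++ [newman_conway (((k : Int) + 2) + 1)] := by
        unfold newman_conway_series
        rw [show ((k : Int) + 2) + 1 + 1 = (((k : Int) + 2) + 1) + 1 by ring]
        rw [PySem.List.pyRange_one_succ_right (by omega : (1:Int) ≤ ((k : Int) + 2) + 1)]
        rw [List.foldl_append]
        rfl
      have hT := ncTab_succ ((k : Int) + 2) (by omega)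
      have hlen : ((ncTab ((k : Int) + 2)).length : Int) = ((k : Int) + 2) + 1 := by
        rw [ncTab_length]; push_cast; ring
      set f := ncTab ((k : Int) + 2) with hf
      set r := PySem.List.pyGetD f (PySem.List.pyGetD f ((((k : Int) + 2) + 1) - 1) 0) 0 +
               PySem.List.pyGetD f ((((k : Int) + 2) + 1) - PySem.List.pyGetD f ((((k : Int) + 2) + 1) - 1) 0) 0 with hr
      have hT' : ncTab (((k : Int) + 2) + 1) = f ++ [r] := hT
      have hnc : newman_conway (((k : Int) + 2) + 1) = r := by
        unfold newman_conway
        rw [hT', show (((k : Int) + 2) + 1) = ((f.length : Int)) from hlen.symm]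
        exact pyGetD_append_len f r 0
      rw [hA, ih, hnc, hT']
      rw [List.drop_append_of_le_length (by simp [hf, ncTab_length])]

-- ===== VERDICT =====
theorem newman_conway_series_spec : Claim_equal_newman_conway_series := by
  intro n _ hpre
  unfold Pre_newman_conway_series at hpre
  unfold Spec_newman_conway_series newman_conway_series_alt
  by_cases h1 : n = 1
  · subst h1; decide
  · obtain ⟨m, hm⟩ : ∃ m : Nat, n = (m : Int) + 2 := by
      refine ⟨(n - 2).toNat, ?_⟩; omega
    subst hm
    rw [series_eq_drop m, sTab_eq_drop m]
    have hlen := ncTab_length m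
    rw [PySem.List.slice_to _ (by omega : (0:Int) ≤ (m : Int) + 2)]
    rw [show (((m : Int) + 2)).toNat = m + 2 by omega]
    rw [List.take_of_length_le (by simp [hlen])]
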